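-- pv_equiv track=rewrite | github.com/squishyjs/daily-solve | Python/maximumAdjacentSum.py | solve
-- ===== SOURCE A (Python) =====
-- def solve(size: int, arr: list[int]) -> int:
--     arr.sort()
--
--     smallest: int = arr[0]
--     arr.pop(0) # pop the smallest element
--     arr.append(smallest)
--
--     count: int = 0
--
--     i = 0
--     while (i < (size - 1)):
--         curr_element: int = arr[i]
--         adj_element: int = arr[i + 1]
--
--         summ = curr_element + adj_element
--         count += summ
--
--         i += 1
--
--     return count
-- ===== SOURCE B (Python) =====
-- def solve(size: int, arr: list[int]) -> int:
--     # closed form: each of the first `size` entries of the rotated sorted list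
--     # is counted twice except the two endpoints
--     s = sorted(arr)
--     rot = s[1:] + [s[0]]
--     if size < 2:
--         return 0
--     return 2 * sum(rot[:size]) - rot[0] - rot[size - 1]
-- ===== Notes on version B (the rewrite author's own statement) =====
-- stated objective: simpler
-- what changed: B replaces A's element-by-element while loop over adjacent pairs with a closed form on the first `size` entries of the rotated sorted list (every windowed element counts twice except the two endpoints: 2*sum(rot[:size]) - rot[0] - rot[size-1]); note A sorts/mutates its argument in place while B does not.
import Mathlib
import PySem

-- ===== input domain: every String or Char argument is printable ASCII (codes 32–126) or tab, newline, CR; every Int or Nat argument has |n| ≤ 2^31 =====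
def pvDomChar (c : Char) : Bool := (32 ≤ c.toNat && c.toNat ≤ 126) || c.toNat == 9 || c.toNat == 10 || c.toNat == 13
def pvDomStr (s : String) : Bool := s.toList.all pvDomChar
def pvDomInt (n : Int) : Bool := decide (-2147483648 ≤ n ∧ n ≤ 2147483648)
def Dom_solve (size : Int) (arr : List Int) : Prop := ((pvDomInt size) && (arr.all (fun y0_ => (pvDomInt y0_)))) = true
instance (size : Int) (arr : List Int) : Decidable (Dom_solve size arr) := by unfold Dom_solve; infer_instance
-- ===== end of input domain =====

-- B replaces A's while loop over adjacent pairs with a closed form; equivalence is about the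
-- RETURN value only: A sorts/mutates its argument in place, B does not.

-- ===== PORT A =====
def solve (size : Int) (arr : List Int) : Int :=
  let sa := PySem.List.sorted arr id
  match PySem.List.pop? sa 0 with        -- arr.sort(); smallest = arr[0]; arr.pop(0) (IndexError on [] is excluded by Pre_)
  | none => 0
  | some (smallest, rest) =>
    let rot := rest ++ [smallest]        -- arr.append(smallest)
    (PySem.List.pyRange 0 (size - 1) 1).foldl
      (fun count i =>
        count + (PySem.List.pyGetD rot i 0 + PySem.List.pyGetD rot (i + 1) 0)) 0

-- ===== PORT B =====
def solve_alt (size : Int) (arr : List Int) : Int :=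
  let s := PySem.List.sorted arr id
  let rot := PySem.List.slice s (some 1) none ++ [PySem.List.pyGetD s 0 0]  -- s[1:] + [s[0]]
  if size < 2 then 0
  else
    2 * (PySem.List.slice rot none (some size)).sum
      - PySem.List.pyGetD rot 0 0 - PySem.List.pyGetD rot (size - 1) 0

-- ===== PRECONDITION & SPEC =====
-- Pre_ excludes exactly the inputs on which A raises IndexError: empty arr (arr[0]) and
-- size > len(arr) (the loop reads arr[i+1] past the end); B raises on the same inputs.
def Pre_solve (size : Int) (arr : List Int) : Prop := arr ≠ [] ∧ size ≤ arr.length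
instance (size : Int) (arr : List Int) : Decidable (Pre_solve size arr) := by unfold Pre_solve; infer_instance
def pvWitness_solve : Int × List Int := (2, [3, 1])

def Spec_solve (size : Int) (arr : List Int) (out : Int) : Prop := out = solve_alt size arr
instance (size : Int) (arr : List Int) (out : Int) : Decidable (Spec_solve size arr out) := by unfold Spec_solve; infer_instance

-- ===== CLAIM (what is proved, stated in full; the proofs are below) =====
def Claim_equal_solve : Prop := ∀ (size : Int) (arr : List Int), Dom_solve size arr → Pre_solve size arr → Spec_solve size arr (solve size arr)

-- ===== LEMMAS AND PROOFS =====

-- sum of adjacent pairs over indices 0..k-1 equals twice the prefix sum minus the endpoints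
lemma sum_adj (rot : List Int) (k : Nat) (hk : k < rot.length) :
    ((PySem.List.pyRange 0 (k : Int) 1).map
        (fun i => PySem.List.pyGetD rot i 0 + PySem.List.pyGetD rot (i + 1) 0)).sum
      = 2 * (rot.take (k + 1)).sum - rot.getD 0 0 - rot.getD k 0 := by
  induction k with
  | zero =>
      simp [PySem.List.pyRange_one_eq_nil]
      cases rot with
      | nil => simp at hk
      | cons x xs => simp; ring
  | succ k ih =>
      have hk' : k < rot.length := Nat.lt_of_succ_lt hk
      have hc : ((k + 1 : Nat) : Int) = (k : Int) + 1 := by push_cast; ring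
      rw [hc, PySem.List.pyRange_one_succ_right (by positivity), List.map_append,
        List.sum_append, ih hk']
      have h1 : PySem.List.pyGetD rot ((k : Nat) : Int) 0 = rot.getD k 0 := by
        simp
      have h2 : PySem.List.pyGetD rot ((k : Int) + 1) 0 = rot.getD (k + 1) 0 := by
        rw [← hc, PySem.List.pyGetD_natCast]
      have hsome : rot[k + 1]? = some rot[k + 1] := List.getElem?_eq_getElem hk
      have h3 : (rot.take (k + 1 + 1)).sum = (rot.take (k + 1)).sum + rot.getD (k + 1) 0 := by
        rw [List.take_add_one, List.sum_append, hsome, List.getD_eq_getElem?_getD, hsome]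
        simp
      simp only [List.map_cons, List.map_nil, List.sum_cons, List.sum_nil, h1, h2, h3]
      ring

-- ===== VERDICT (by name: the statement is the Claim_ definition above) =====
theorem solve_spec : Claim_equal_solve := by
  intro size arr _ hpre
  obtain ⟨hne, hsz⟩ := hpre
  unfold Spec_solve solve solve_alt
  have hlen : (PySem.List.sorted arr id).length = arr.length := PySem.List.length_sorted ..
  cases hsa : PySem.List.sorted arr id with
  | nil =>
      exfalso; apply hne
      have := hlen; rw [hsa] at this; exact List.eq_nil_of_length_eq_zero this.symm
  | cons x rest =>
  have hlen' : ((x :: rest : List Int)).length = arr.length := by rw [← hsa]; exact hlen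
  simp only [PySem.List.pop?_zero_cons, PySem.List.slice_from_one, PySem.List.pyGetD_zero_cons,
    List.tail_cons]
  set rot : List Int := rest ++ [x] with hrot
  have hrotlen : rot.length = arr.length := by
    simp [hrot]; simpa using hlen'
  by_cases hs2 : size < 2
  · rw [if_pos hs2, PySem.List.pyRange_one_eq_nil (by omega)]
    simp
  · rw [if_neg hs2]
    rw [PySem.List.foldl_add (PySem.List.pyRange 0 (size - 1) 1)
      (fun j => PySem.List.pyGetD rot j 0 + PySem.List.pyGetD rot (j + 1) 0) 0, zero_add]
    have hk : size - 1 = (((size - 1).toNat : Nat) : Int) := by omega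
    set k : Nat := (size - 1).toNat with hkdef
    have hklt : k < rot.length := by omega
    rw [hk, sum_adj rot k hklt]
    have hw : PySem.List.slice rot none (some size) = rot.take size.toNat :=
      PySem.List.slice_to _ (by omega)
    have h0 : PySem.List.pyGetD rot 0 0 = rot.getD 0 0 := by
      rw [PySem.List.pyGetD_zero, List.getD_eq_getElem?_getD]
    have hlast : PySem.List.pyGetD rot ((k : Nat) : Int) 0 = rot.getD k 0 := by simp
    rw [hw, h0, hlast]
    have htake : size.toNat = k + 1 := by omega
    rw [htake]
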